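-- pv_equiv track=rewrite | github.com/review-list/TEST | src/fetch_to_works_fanza.py | _looks_like_placeholder_url
-- ===== SOURCE A (Python) =====
-- from typing import Any, Dict, List, Optional, Tuple
--
-- def _clean_str(s: Any) -> str:
--     return str(s).strip() if s is not None else ""
--
-- def _looks_like_placeholder_url(url: str) -> bool:
--     u = _clean_str(url).lower()
--     if not u:
--         return True
--     hints = (
--         "now_print",
--         "nowprint",
--         "nowprinting",
--         "now_printing",
--         "noimage",
--         "no_img",
--         "no-img",
--         "nophoto",
--         "no-photo",
--         "comingsoon",
--         "coming_soon",
--         "placeholder",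
--     )
--     return any(h in u for h in hints)
-- ===== SOURCE B (Python) =====
-- # Trie-style scan: walk the string once, dispatch on the current character
-- # ('n'/'c'/'p') and compare what follows against a factored, prefix-minimal set
-- # of tails (the redundant "nowprinting"/"now_printing" entries, which contain
-- # "nowprint"/"now_print" as prefixes, disappear).
--
-- _N_TAILS = ("ow_print", "owprint", "oimage", "ophoto", "o_img", "o-img", "o-photo")
-- _C_TAILS = ("omingsoon", "oming_soon")
--
-- def _looks_like_placeholder_url(url: str) -> bool:
--     u = (str(url).strip() if url is not None else "").lower()
--     if not u:
--         return True
--     for i, c in enumerate(u):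
--         if c == "n":
--             if u.startswith(_N_TAILS, i + 1):
--                 return True
--         elif c == "c":
--             if u.startswith(_C_TAILS, i + 1):
--                 return True
--         elif c == "p":
--             if u.startswith("laceholder", i + 1):
--                 return True
--     return False
-- ===== Notes on version B (the rewrite author's own statement) =====
-- stated objective: alternative
-- what changed: A runs twelve independent substring searches over the normalized URL; B makes one left-to-right scan that dispatches on the current character ('n'/'c'/'p') and matches what follows against a factored, prefix-minimal table of hint tails (the redundant now_printing/nowprinting entries, which have other hints as prefixes, are dropped).
import Mathlib
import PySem

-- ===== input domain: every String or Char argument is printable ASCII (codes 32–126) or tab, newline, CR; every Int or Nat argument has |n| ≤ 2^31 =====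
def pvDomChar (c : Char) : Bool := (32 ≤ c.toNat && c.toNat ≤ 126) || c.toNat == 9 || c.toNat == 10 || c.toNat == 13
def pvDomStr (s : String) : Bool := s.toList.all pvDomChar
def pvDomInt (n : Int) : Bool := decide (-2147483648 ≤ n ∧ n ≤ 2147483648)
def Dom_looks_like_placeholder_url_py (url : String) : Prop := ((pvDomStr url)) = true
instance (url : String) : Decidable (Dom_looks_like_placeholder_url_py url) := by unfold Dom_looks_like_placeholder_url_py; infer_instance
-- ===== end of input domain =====

-- B replaces A's twelve independent `h in u` substring searches with one left-to-right
-- trie-style scan dispatching on the current character and a prefix-minimal suffix table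
-- (alternative, not measured faster).

-- ===== PORT A =====
-- the tuple of hints from A
def hintsA : List String :=
  ["now_print", "nowprint", "nowprinting", "now_printing", "noimage", "no_img",
   "no-img", "nophoto", "no-photo", "comingsoon", "coming_soon", "placeholder"]

-- _clean_str(url): url is a str, so str(url) is url itself; strip whitespace
def looks_like_placeholder_url_py (url : String) : Bool :=
  let u := PySem.Chars.lower (PySem.Chars.strip url.toList)
  if u = [] then true
  else hintsA.any (fun h => PySem.Chars.isIn h.toList u)

-- ===== PORT B =====
-- the factored tail tables of Source B
def nTails : List String :=
  ["ow_print", "owprint", "oimage", "ophoto", "o_img", "o-img", "o-photo"]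
def cTails : List String := ["omingsoon", "oming_soon"]

-- the `for i, c in enumerate(u)` loop: at each position dispatch on c and
-- test the remaining tail `t = u[i+1:]` against the matching suffix table
def scanAlt : List Char → Bool
  | [] => false
  | c :: t =>
      if c = 'n' then
        if nTails.any (fun p => PySem.Chars.startswith t p.toList) then true else scanAlt t
      else if c = 'c' then
        if cTails.any (fun p => PySem.Chars.startswith t p.toList) then true else scanAlt t
      else if c = 'p' then
        if PySem.Chars.startswith t "laceholder".toList then true else scanAlt t
      else scanAlt t

def looks_like_placeholder_url_py_alt (url : String) : Bool :=
  let u := PySem.Chars.lower (PySem.Chars.strip url.toList)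
  if u = [] then true
  else scanAlt u

-- ===== PRECONDITION & SPEC =====
def Spec_looks_like_placeholder_url_py (url : String) (out : Bool) : Prop := out = looks_like_placeholder_url_py_alt url
instance (url : String) (out : Bool) : Decidable (Spec_looks_like_placeholder_url_py url out) := by unfold Spec_looks_like_placeholder_url_py; infer_instance

-- ===== CLAIM (what is proved, stated in full; the proofs are below) =====
def Claim_equal_looks_like_placeholder_url_py : Prop := ∀ (url : String), Dom_looks_like_placeholder_url_py url → Spec_looks_like_placeholder_url_py url (looks_like_placeholder_url_py url)

-- ===== LEMMAS AND PROOFS =====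

-- the prefix-minimal hint set B's dispatch realises
def hintsMin : List String :=
  ["now_print", "nowprint", "noimage", "no_img", "no-img", "nophoto", "no-photo",
   "comingsoon", "coming_soon", "placeholder"]

-- B's per-position dispatch tests exactly "some minimal hint is a prefix here"
theorem dispatch_eq (c : Char) (t : List Char) :
    (if c = 'n' then nTails.any (fun p => PySem.Chars.startswith t p.toList)
     else if c = 'c' then cTails.any (fun p => PySem.Chars.startswith t p.toList)
     else if c = 'p' then PySem.Chars.startswith t "laceholder".toList
     else false)
    = hintsMin.any (fun h => PySem.Chars.startswith (c :: t) h.toList) := by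
  apply Bool.coe_iff_coe.mp
  by_cases hn : c = 'n'
  · subst hn
    simp [hintsMin, nTails, PySem.Chars.startswith_iff, List.cons_prefix_cons]
    tauto
  · by_cases hc : c = 'c'
    · subst hc
      simp [hintsMin, cTails, PySem.Chars.startswith_iff, List.cons_prefix_cons]
    · by_cases hp : c = 'p'
      · subst hp
        simp [hintsMin, PySem.Chars.startswith_iff, List.cons_prefix_cons]
      · have hn' : 'n' ≠ c := fun h => hn h.symm
        have hc' : 'c' ≠ c := fun h => hc h.symm
        have hp' : 'p' ≠ c := fun h => hp h.symm
        simp [hintsMin, hn, hc, hp, hn', hc', hp', PySem.Chars.startswith_iff,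
          List.cons_prefix_cons]

-- the scan finds a match iff some minimal hint occurs as an infix
theorem scanAlt_iff (s : List Char) :
    scanAlt s = true ↔ ∃ h ∈ hintsMin, h.toList <:+: s := by
  induction s with
  | nil =>
      simp only [scanAlt, Bool.false_eq_true, false_iff]
      rintro ⟨h, hm, hinf⟩
      have hnil : h.toList = [] := List.eq_nil_of_infix_nil hinf
      fin_cases hm <;> simp_all
  | cons c t ih =>
      have hsplit : scanAlt (c :: t)
          = ((if c = 'n' then nTails.any (fun p => PySem.Chars.startswith t p.toList)
              else if c = 'c' then cTails.any (fun p => PySem.Chars.startswith t p.toList)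
              else if c = 'p' then PySem.Chars.startswith t "laceholder".toList
              else false) || scanAlt t) := by
        simp only [scanAlt]
        split_ifs <;> simp_all
      rw [hsplit, dispatch_eq, Bool.or_eq_true, ih, List.any_eq_true]
      constructor
      · rintro (⟨h, hm, hs⟩ | ⟨h, hm, hi⟩)
        · exact ⟨h, hm, List.IsPrefix.isInfix ((PySem.Chars.startswith_iff _ _).mp hs)⟩
        · exact ⟨h, hm, List.infix_cons_iff.mpr (Or.inr hi)⟩
      · rintro ⟨h, hm, hinf⟩
        rcases List.infix_cons_iff.mp hinf with hpre | hi
        · exact Or.inl ⟨h, hm, (PySem.Chars.startswith_iff _ _).mpr hpre⟩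
        · exact Or.inr ⟨h, hm, hi⟩

-- every hint of A has a minimal hint as a prefix (the two "…ing" forms reduce)
theorem hintsA_reduce : ∀ h ∈ hintsA, ∃ g ∈ hintsMin, g.toList <+: h.toList := by decide

theorem hintsMin_sub : ∀ g ∈ hintsMin, g ∈ hintsA := by decide

theorem scanAlt_eq_any_isIn (s : List Char) :
    scanAlt s = hintsA.any (fun h => PySem.Chars.isIn h.toList s) := by
  rcases Bool.eq_false_or_eq_true (scanAlt s) with h | h <;> rw [h] <;> symm
  · rcases (scanAlt_iff s).mp h with ⟨g, hm, hinf⟩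
    exact List.any_eq_true.mpr
      ⟨g, hintsMin_sub g hm, (PySem.Chars.isIn_iff_infix _ _).mpr hinf⟩
  · rw [Bool.eq_false_iff]
    intro hany
    rcases List.any_eq_true.mp hany with ⟨g, hm, hin⟩
    rcases hintsA_reduce g hm with ⟨m, hmm, hpre⟩
    have : scanAlt s = true :=
      (scanAlt_iff s).mpr ⟨m, hmm, hpre.isInfix.trans ((PySem.Chars.isIn_iff_infix _ _).mp hin)⟩
    exact Bool.eq_false_iff.mp h this

-- ===== VERDICT (by name: the statement is the Claim_ definition above) =====
theorem looks_like_placeholder_url_py_spec : Claim_equal_looks_like_placeholder_url_py := by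
  intro url _
  unfold Spec_looks_like_placeholder_url_py looks_like_placeholder_url_py looks_like_placeholder_url_py_alt
  simp only []
  split_ifs with h
  · rfl
  · exact (scanAlt_eq_any_isIn _).symm
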